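-- pv_equiv track=rewrite | github.com/cdeed/pigLatinify | pigLatinifyName.py | getConsonantCluster
-- ===== SOURCE A (Python) =====
-- vowels = ['a','e','i','o','u']
--
-- def getConsonantCluster(word):
--     letterList = list(word.lower())
--     cluster = ''
--     if letterList[0] in vowels:
--         return ''
--     else:
--         for letter in letterList:
--             if letter not in vowels:
--                 cluster += letter
--             else:
--                 break
--         return cluster
-- ===== SOURCE B (Python) =====
-- vowels = ['a','e','i','o','u']
--
-- def getConsonantCluster(word):
--     word = word.lower()
--     if word[0] in vowels:
--         return ''
--     idx = next((i for i, c in enumerate(word) if c in vowels), len(word))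
--     return word[:idx]
-- ===== Notes on version B (the rewrite author's own statement) =====
-- stated objective: idiomatic
-- what changed: Replaces the per-character accumulate-until-break loop with locating the first vowel's index and slicing the lowercased word up to it.
import Mathlib
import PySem

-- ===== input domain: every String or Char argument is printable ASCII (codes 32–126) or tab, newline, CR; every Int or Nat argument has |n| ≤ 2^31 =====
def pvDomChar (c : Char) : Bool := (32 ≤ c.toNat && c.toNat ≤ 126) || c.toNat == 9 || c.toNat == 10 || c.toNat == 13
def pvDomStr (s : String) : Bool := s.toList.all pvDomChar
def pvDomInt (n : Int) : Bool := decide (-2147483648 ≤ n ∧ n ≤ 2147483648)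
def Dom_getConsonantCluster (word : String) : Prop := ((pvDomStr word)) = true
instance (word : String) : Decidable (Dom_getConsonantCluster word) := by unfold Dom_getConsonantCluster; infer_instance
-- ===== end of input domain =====

-- B replaces A's accumulate-until-break loop by locating the first vowel's index and slicing; idiomatic, same cost.

-- ===== PORT A =====
def pyVowels : List Char := ['a', 'e', 'i', 'o', 'u']

-- the for-loop: append each letter to the cluster until a vowel breaks the loop
def gccLoop : List Char → List Char → List Char
  | [], acc => acc
  | c :: rest, acc => if c ∉ pyVowels then gccLoop rest (acc ++ [c]) else acc

def getConsonantCluster (word : String) : String :=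
  let letterList := (PySem.Str.lower word).toList
  match PySem.List.pyGet? letterList 0 with
  | none => ""   -- IndexError on letterList[0]; excluded by Pre_
  | some c =>
    if c ∈ pyVowels then ""
    else String.mk (gccLoop letterList [])

-- ===== PORT B =====
def getConsonantCluster_alt (word : String) : String :=
  let w := (PySem.Str.lower word).toList
  match PySem.List.pyGet? w 0 with
  | none => ""   -- IndexError on word[0]; excluded by Pre_
  | some c =>
    if c ∈ pyVowels then ""
    else
      -- idx = first vowel position, defaulting to len(word); return word[:idx]
      let idx := (w.findIdx? (· ∈ pyVowels)).getD w.length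
      String.mk (w.take idx)

-- ===== PRECONDITION & SPEC =====
-- Pre_ excludes only the empty string, on which both Pythons raise IndexError.
def Pre_getConsonantCluster (word : String) : Prop := word ≠ ""
instance (word : String) : Decidable (Pre_getConsonantCluster word) := by unfold Pre_getConsonantCluster; infer_instance
def pvWitness_getConsonantCluster : String := "Stry"

def Spec_getConsonantCluster (word : String) (out : String) : Prop := out = getConsonantCluster_alt word
instance (word : String) (out : String) : Decidable (Spec_getConsonantCluster word out) := by unfold Spec_getConsonantCluster; infer_instance

-- ===== CLAIM (what is proved, stated in full; the proofs are below) =====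
def Claim_equal_getConsonantCluster : Prop := ∀ (word : String), Dom_getConsonantCluster word → Pre_getConsonantCluster word → Spec_getConsonantCluster word (getConsonantCluster word)

-- ===== LEMMAS AND PROOFS =====

-- A's loop appends exactly the leading non-vowel prefix to the accumulator.
theorem gccLoop_eq_takeWhile (cs : List Char) : ∀ acc : List Char,
    gccLoop cs acc = acc ++ cs.takeWhile (fun c => decide (c ∉ pyVowels)) := by
  induction cs with
  | nil => intro acc; simp [gccLoop]
  | cons c rest ih =>
    intro acc
    by_cases h : c ∈ pyVowels
    · simp [gccLoop, h, List.takeWhile_cons]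
    · simp [gccLoop, h, ih]

-- B's take-up-to-first-vowel equals the leading non-vowel prefix.
theorem take_findIdx?_eq_takeWhile (cs : List Char) :
    cs.take (((cs.findIdx? (· ∈ pyVowels)).getD cs.length)) =
      cs.takeWhile (fun c => decide (c ∉ pyVowels)) := by
  induction cs with
  | nil => simp
  | cons c rest ih =>
    by_cases h : c ∈ pyVowels
    · simp [List.findIdx?_cons, h]
    · simp only [List.findIdx?_cons, h, decide_false, List.takeWhile_cons,
        decide_not, Bool.not_false]
      cases hf : rest.findIdx? (· ∈ pyVowels) with
      | none => simpa [hf] using congrArg (List.cons c) (by simpa [hf] using ih)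
      | some k => simpa [hf] using congrArg (List.cons c) (by simpa [hf] using ih)

-- ===== VERDICT (by name: the statement is the Claim_ definition above) =====
theorem getConsonantCluster_spec : Claim_equal_getConsonantCluster := by
  intro word _ _
  unfold Spec_getConsonantCluster getConsonantCluster getConsonantCluster_alt
  cases hL : (PySem.Str.lower word).toList with
  | nil => rfl
  | cons c rest =>
    simp only [PySem.List.pyGet?_zero_cons]
    by_cases h : c ∈ pyVowels
    · simp [h]
    · simp only [h, if_false]
      rw [gccLoop_eq_takeWhile, take_findIdx?_eq_takeWhile]
      simp
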